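-- pv_equiv track=rewrite | github.com/Qu1et-x/Computer-Science | CS61A/lab/lab12/lab12.py | merge_numbers
-- ===== SOURCE A (Python) =====
-- def merge_numbers(n1, n2):
--     """Merges two numbers that have decreasing digits.
--
--     >>> merge_numbers(31, 42)
--     4321
--     >>> merge_numbers(21, 0)
--     21
--     >>> merge_numbers(21, 31)
--     3211
--     """
--     "*** YOUR CODE HERE ***"
--     if n1 == 0 or n2 == 0:
--         return max(n1, n2)
--     elif n1 % 10 > n2 % 10:
--         return n2 % 10 + merge_numbers(n1, n2 // 10) * 10
--     else:
--         return n1 % 10 + merge_numbers(n1 // 10, n2) * 10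
-- ===== SOURCE B (Python) =====
-- def merge_numbers(n1, n2):
--     """Merges two numbers that have decreasing digits, iteratively."""
--     digits = []  # result digits, least-significant first
--     while n1 > 0 and n2 > 0:
--         if n1 % 10 > n2 % 10:
--             digits.append(n2 % 10)
--             n2 //= 10
--         else:
--             digits.append(n1 % 10)
--             n1 //= 10
--     rem = max(n1, n2)
--     while rem > 0:
--         digits.append(rem % 10)
--         rem //= 10
--     out = 0
--     for d in reversed(digits):
--         out = out * 10 + d
--     return out
-- ===== Notes on version B (the rewrite author's own statement) =====
-- stated objective: alternative
-- what changed: Replaces A's recursion (which builds the number on the way back up the call stack) by an iterative two-phase merge: a loop collects the smaller last digit into a least-significant-first list while stripping it, a second loop drains the leftover number, and a final fold rebuilds the integer.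
-- outside the precondition, e.g. on merge_numbers(-216934237, 651086875): A returns 651086878730657653, B returns 651086875; on merge_numbers(-20, 1): A returns 10, B returns 1
import Mathlib
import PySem

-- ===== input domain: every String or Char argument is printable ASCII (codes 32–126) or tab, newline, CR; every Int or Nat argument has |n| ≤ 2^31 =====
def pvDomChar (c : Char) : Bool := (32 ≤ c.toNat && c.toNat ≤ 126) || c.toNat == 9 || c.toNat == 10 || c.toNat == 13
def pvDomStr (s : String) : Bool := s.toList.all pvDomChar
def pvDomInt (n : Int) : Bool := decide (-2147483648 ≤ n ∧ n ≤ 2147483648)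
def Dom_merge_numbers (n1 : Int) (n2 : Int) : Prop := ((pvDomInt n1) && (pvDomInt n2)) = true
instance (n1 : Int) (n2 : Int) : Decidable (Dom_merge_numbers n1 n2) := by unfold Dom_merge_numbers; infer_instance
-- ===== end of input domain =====

-- B replaces A's recursion by an iterative two-phase digit merge plus a rebuild fold (alternative
-- decomposition, same cost). Equivalence is claimed on nonnegative arguments (Pre_).

-- ===== PORT A =====
-- A's recursion does not terminate on some negative inputs (Python: RecursionError), so the
-- transliteration carries a fuel counter bounding the recursion depth; the wrapper passes
-- n1.natAbs + n2.natAbs + 1 fuel, which is proved sufficient on Pre_ (each call strips a digit).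
def mergeFuelA : Nat → Int → Int → Int
  | 0, _, _ => 0
  | fuel + 1, n1, n2 =>
    if n1 = 0 ∨ n2 = 0 then max n1 n2
    else if PySem.Int.mod n1 10 > PySem.Int.mod n2 10 then
      PySem.Int.mod n2 10 + mergeFuelA fuel n1 (PySem.Int.floordiv n2 10) * 10
    else
      PySem.Int.mod n1 10 + mergeFuelA fuel (PySem.Int.floordiv n1 10) n2 * 10

def merge_numbers (n1 : Int) (n2 : Int) : Int :=
  mergeFuelA (n1.natAbs + n2.natAbs + 1) n1 n2

-- ===== PORT B =====
-- termination helper for the while-loops: stripping the last digit of a positive number shrinks it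
theorem pvFloordivTen_toNat_lt {n : Int} (h : 0 < n) :
    (PySem.Int.floordiv n 10).toNat < n.toNat := by
  rw [PySem.Int.floordiv_eq_ediv_of_pos (by omega)]
  omega

-- while n1 > 0 and n2 > 0: append the smaller last digit, strip it; returns the final state
def mergeLoopB (n1 n2 : Int) (digits : List Int) : Int × Int × List Int :=
  if h : 0 < n1 ∧ 0 < n2 then
    if PySem.Int.mod n1 10 > PySem.Int.mod n2 10 then
      mergeLoopB n1 (PySem.Int.floordiv n2 10) (digits ++ [PySem.Int.mod n2 10])
    else
      mergeLoopB (PySem.Int.floordiv n1 10) n2 (digits ++ [PySem.Int.mod n1 10])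
  else (n1, n2, digits)
termination_by n1.toNat + n2.toNat
decreasing_by
  · have := pvFloordivTen_toNat_lt h.2; omega
  · have := pvFloordivTen_toNat_lt h.1; omega

-- while rem > 0: drain the remaining digits
def drainLoopB (rem : Int) (digits : List Int) : List Int :=
  if h : 0 < rem then
    drainLoopB (PySem.Int.floordiv rem 10) (digits ++ [PySem.Int.mod rem 10])
  else digits
termination_by rem.toNat
decreasing_by have := pvFloordivTen_toNat_lt h; omega

def merge_numbers_alt (n1 : Int) (n2 : Int) : Int :=
  let s := mergeLoopB n1 n2 []
  let digits := drainLoopB (max s.1 s.2.1) s.2.2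
  digits.reverse.foldl (fun out d => out * 10 + d) 0

-- ===== PRECONDITION & SPEC =====
-- Pre_ excludes negative arguments: digits are only meaningful for nonnegative numbers, and there A
-- either recurses forever (Python RecursionError, since -1 // 10 == -1) or returns values produced
-- by that same floor-division artefact, interleaved in a way no closed form separates.
def Pre_merge_numbers (n1 : Int) (n2 : Int) : Prop := 0 ≤ n1 ∧ 0 ≤ n2
instance (n1 : Int) (n2 : Int) : Decidable (Pre_merge_numbers n1 n2) := by
  unfold Pre_merge_numbers; infer_instance

def pvWitness_merge_numbers : Int × Int := (21, 31)

def Spec_merge_numbers (n1 : Int) (n2 : Int) (out : Int) : Prop := out = merge_numbers_alt n1 n2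
instance (n1 : Int) (n2 : Int) (out : Int) : Decidable (Spec_merge_numbers n1 n2 out) := by
  unfold Spec_merge_numbers; infer_instance

-- ===== CLAIM (what is proved, stated in full; the proofs are below) =====
def Claim_equal_merge_numbers : Prop := ∀ (n1 : Int) (n2 : Int), Dom_merge_numbers n1 n2 → Pre_merge_numbers n1 n2 → Spec_merge_numbers n1 n2 (merge_numbers n1 n2)

-- ===== LEMMAS AND PROOFS =====

-- rebuild fold: value of a least-significant-first digit list
def pvReb (l : List Int) : Int := l.reverse.foldl (fun out d => out * 10 + d) 0

theorem pvReb_cons (d : Int) (l : List Int) : pvReb (d :: l) = 10 * pvReb l + d := by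
  simp [pvReb, List.foldl_append]; ring

-- the loops only ever append to `digits`: a prefix passes through unchanged
theorem mergeLoopB_append (n1 n2 : Int) (ds1 ds : List Int) :
    mergeLoopB n1 n2 (ds1 ++ ds) =
      ((mergeLoopB n1 n2 ds).1, (mergeLoopB n1 n2 ds).2.1, ds1 ++ (mergeLoopB n1 n2 ds).2.2) := by
  fun_induction mergeLoopB n1 n2 ds generalizing ds1 with
  | case1 n1 n2 ds h hc ih =>
    conv_lhs => rw [mergeLoopB]
    simp only [dif_pos h, if_pos hc, List.append_assoc]
    exact ih ds1
  | case2 n1 n2 ds h hc ih =>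
    conv_lhs => rw [mergeLoopB]
    simp only [dif_pos h, if_neg hc, List.append_assoc]
    exact ih ds1
  | case3 n1 n2 ds h =>
    conv_lhs => rw [mergeLoopB]
    simp [dif_neg h]

theorem drainLoopB_append (m : Int) (ds1 ds : List Int) :
    drainLoopB m (ds1 ++ ds) = ds1 ++ drainLoopB m ds := by
  fun_induction drainLoopB m ds generalizing ds1 with
  | case1 m ds h ih =>
    conv_lhs => rw [drainLoopB]
    simp only [dif_pos h, List.append_assoc]
    exact ih ds1
  | case2 m ds h =>
    conv_lhs => rw [drainLoopB]
    simp [dif_neg h]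

-- draining a nonnegative number and rebuilding gives it back
theorem pvReb_drain_aux (k : Nat) : ∀ m : Int, 0 ≤ m → m.toNat ≤ k → pvReb (drainLoopB m []) = m := by
  induction k with
  | zero =>
    intro m hm hk
    have hm0 : m = 0 := by omega
    subst hm0
    have : drainLoopB 0 [] = [] := by rw [drainLoopB]; simp
    rw [this]
    simp [pvReb]
  | succ k ih =>
    intro m hm hk
    by_cases hp : 0 < m
    · have hstep : drainLoopB m []
          = drainLoopB (PySem.Int.floordiv m 10) [PySem.Int.mod m 10] := by
        conv_lhs => rw [drainLoopB]
        simp only [dif_pos hp, List.nil_append]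
      have happ := drainLoopB_append (PySem.Int.floordiv m 10) [PySem.Int.mod m 10] []
      simp only [List.append_nil, List.singleton_append] at happ
      have hq : 0 ≤ PySem.Int.floordiv m 10 := by
        rw [PySem.Int.floordiv_eq_ediv_of_pos (by omega)]; omega
      have hlt := pvFloordivTen_toNat_lt hp
      rw [hstep, happ, pvReb_cons, ih _ hq (by omega)]
      have := PySem.Int.floordiv_mul_add_mod m 10
      omega
    · have hm0 : m = 0 := by omega
      subst hm0
      have : drainLoopB 0 [] = [] := by rw [drainLoopB]; simp
      rw [this]
      simp [pvReb]

theorem pvReb_drain (m : Int) (hm : 0 ≤ m) : pvReb (drainLoopB m []) = m :=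
  pvReb_drain_aux m.toNat m hm le_rfl

-- B unfolded through pvReb
theorem alt_eq (n1 n2 : Int) :
    merge_numbers_alt n1 n2 =
      pvReb (drainLoopB (max (mergeLoopB n1 n2 []).1 (mergeLoopB n1 n2 []).2.1)
        (mergeLoopB n1 n2 []).2.2) := rfl

-- one merge step of B, when both numbers are positive
theorem alt_step (n1 n2 : Int) (h : 0 < n1 ∧ 0 < n2) :
    merge_numbers_alt n1 n2 =
      if PySem.Int.mod n1 10 > PySem.Int.mod n2 10 then
        10 * merge_numbers_alt n1 (PySem.Int.floordiv n2 10) + PySem.Int.mod n2 10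
      else
        10 * merge_numbers_alt (PySem.Int.floordiv n1 10) n2 + PySem.Int.mod n1 10 := by
  rw [alt_eq]
  have hstep : mergeLoopB n1 n2 []
      = if PySem.Int.mod n1 10 > PySem.Int.mod n2 10 then
          mergeLoopB n1 (PySem.Int.floordiv n2 10) [PySem.Int.mod n2 10]
        else mergeLoopB (PySem.Int.floordiv n1 10) n2 [PySem.Int.mod n1 10] := by
    conv_lhs => rw [mergeLoopB]
    simp only [dif_pos h, List.nil_append]
  rw [hstep]
  split
  · have happ := mergeLoopB_append n1 (PySem.Int.floordiv n2 10) [PySem.Int.mod n2 10] []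
    simp only [List.append_nil] at happ
    rw [happ]
    simp only [List.singleton_append]
    rw [← List.singleton_append, drainLoopB_append, List.singleton_append, pvReb_cons, ← alt_eq]
  · have happ := mergeLoopB_append (PySem.Int.floordiv n1 10) n2 [PySem.Int.mod n1 10] []
    simp only [List.append_nil] at happ
    rw [happ]
    simp only [List.singleton_append]
    rw [← List.singleton_append, drainLoopB_append, List.singleton_append, pvReb_cons, ← alt_eq]

-- base case of B: one argument is zero
theorem alt_base (n1 n2 : Int) (h1 : 0 ≤ n1) (h2 : 0 ≤ n2) (h : n1 = 0 ∨ n2 = 0) :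
    merge_numbers_alt n1 n2 = max n1 n2 := by
  unfold merge_numbers_alt
  rw [mergeLoopB]
  have hng : ¬ (0 < n1 ∧ 0 < n2) := by omega
  simp only [dif_neg hng]
  exact pvReb_drain _ (by omega)

-- main induction: enough fuel makes A's recursion compute B's value, on nonnegative inputs
theorem mergeFuelA_eq_alt (fuel : Nat) (n1 n2 : Int) (h1 : 0 ≤ n1) (h2 : 0 ≤ n2)
    (hf : n1.toNat + n2.toNat < fuel) :
    mergeFuelA fuel n1 n2 = merge_numbers_alt n1 n2 := by
  induction fuel generalizing n1 n2 with
  | zero => omega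
  | succ f ih =>
    rw [mergeFuelA]
    by_cases hz : n1 = 0 ∨ n2 = 0
    · rw [if_pos hz, alt_base n1 n2 h1 h2 hz]
    · rw [if_neg hz]
      have hp : 0 < n1 ∧ 0 < n2 := by omega
      rw [alt_step n1 n2 hp]
      have hd1 := pvFloordivTen_toNat_lt hp.1
      have hd2 := pvFloordivTen_toNat_lt hp.2
      have hn1 : 0 ≤ PySem.Int.floordiv n1 10 := by
        rw [PySem.Int.floordiv_eq_ediv_of_pos (by omega)]; omega
      have hn2 : 0 ≤ PySem.Int.floordiv n2 10 := by
        rw [PySem.Int.floordiv_eq_ediv_of_pos (by omega)]; omega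
      split
      · rw [ih n1 _ h1 hn2 (by omega)]; ring
      · rw [ih _ n2 hn1 h2 (by omega)]; ring

-- ===== VERDICT (by name: the statement is the Claim_ definition above) =====
theorem merge_numbers_spec : Claim_equal_merge_numbers := by
  intro n1 n2 _ hpre
  obtain ⟨h1, h2⟩ := hpre
  unfold Spec_merge_numbers merge_numbers
  exact mergeFuelA_eq_alt _ n1 n2 h1 h2 (by omega)
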